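-- pv_equiv track=rewrite | github.com/MrDvD/itmo_labs | computer science/lab1/code_1.py | to_nine_sym
-- ===== SOURCE A (Python) =====
-- def to_nine_inv(x):
--     res, x = list(), int(x)
--     if not x:
--       return [0]
--     while x > 0:
--         res.append(x % 9)
--         x //= 9
--     return res
--
-- def to_nine_sym(num):
--     x, res = to_nine_inv(num), list()
--     i, l = 0, len(x)
--     while i < l:
--         if x[i] > 4:
--             if x[i] == 9:
--                 res.append('0')
--             else:
--                 res.append("{" + f'^{9 - x[i]}' + "}")
--             if i + 1 == len(x):
--                 x.append(1)
--                 l += 1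
--             else:
--                 x[i + 1] += 1
--         else:
--             res.append(str(x[i]))
--         i += 1
--     return ''.join(res[::-1])
-- ===== SOURCE B (Python) =====
-- def to_nine_sym(num):
--     x = int(num)
--     if x == 0:
--         return '0'
--     if x < 0:
--         return ''
--     digits = []
--     while x > 0:
--         r = x % 9
--         x //= 9
--         if r > 4:
--             r -= 9
--             x += 1
--         digits.append('{^' + str(-r) + '}' if r < 0 else str(r))
--     return ''.join(reversed(digits))
-- ===== Notes on version B (the rewrite author's own statement) =====
-- stated objective: simpler
-- what changed: Replaces A's two-phase pipeline (build a base-9 digit list, then rewrite it in a second pass with in-list carries and a look-ahead append) by a single balanced-division loop on the integer itself (r = x%9; x//=9; if r>4: r-=9; x+=1), emitting tokens directly.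
import Mathlib
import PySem

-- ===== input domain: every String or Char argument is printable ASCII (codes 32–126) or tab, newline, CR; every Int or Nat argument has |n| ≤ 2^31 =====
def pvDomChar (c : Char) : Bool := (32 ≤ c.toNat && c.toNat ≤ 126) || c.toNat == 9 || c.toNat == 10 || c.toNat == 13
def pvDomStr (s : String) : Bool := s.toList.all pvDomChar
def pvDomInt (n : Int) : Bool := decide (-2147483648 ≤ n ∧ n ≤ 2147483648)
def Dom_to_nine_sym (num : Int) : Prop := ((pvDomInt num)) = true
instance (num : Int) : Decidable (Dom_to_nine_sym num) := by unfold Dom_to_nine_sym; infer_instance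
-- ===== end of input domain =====

-- B folds A's two phases (digit extraction, then a carry/look-ahead rewrite pass over the digit
-- list) into one balanced-division loop on the integer itself; objective: simpler.

-- ===== PORT A =====
-- while x > 0: res.append(x % 9); x //= 9
def nineLoop (x : Int) (res : List Int) : List Int :=
  if h : 0 < x then
    nineLoop (PySem.Int.floordiv x 9) (res ++ [PySem.Int.mod x 9])
  else res
termination_by x.toNat
decreasing_by
  rw [PySem.Int.floordiv_eq_ediv_of_pos (by omega)]
  omega

def to_nine_inv (x : Int) : List Int :=
  if x = 0 then [0] else nineLoop x []

-- the while loop of to_nine_sym; Python keeps l as a separate variable, but l = len(x) at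
-- every iteration (l is incremented exactly when x is appended to), so the guard i < l is
-- transcribed as i < x.length
def symLoop (x : List Int) (res : List String) (i : Nat) : List String :=
  if h : i < x.length then
    let d := x.getD i 0
    if 4 < d then
      let res' := res ++ [if d = 9 then "0" else "{" ++ ("^" ++ PySem.Int.toStr (9 - d)) ++ "}"]
      if i + 1 = x.length then
        symLoop (x ++ [1]) res' (i + 1)
      else
        symLoop (x.set (i + 1) (x.getD (i + 1) 0 + 1)) res' (i + 1)
    else
      symLoop x (res ++ [PySem.Int.toStr d]) (i + 1)
  else res
termination_by (x.length - i) + (if (x.drop i).any (fun a => decide (4 < a)) then 1 else 0)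
decreasing_by
  · -- append branch: new tail past i+1 is [1], no digit > 4 remains
    have hE : i + 1 = x.length := ‹_›
    have hx : (x ++ [1]).drop (i + 1) = [1] := by
      rw [List.drop_append_of_le_length (by omega)]
      simp [List.drop_of_length_le (by omega : x.length ≤ i + 1)]
    have hd : (x.drop i).any (fun a => decide (4 < a)) = true := by
      have hm : x.getD i 0 ∈ x.drop i := by
        rw [List.drop_eq_getElem_cons h, List.getD_eq_getElem x 0 h]
        exact List.mem_cons_self
      exact List.any_eq_true.mpr ⟨_, hm, by simpa using ‹4 < x.getD i 0›⟩
    simp only [hx, List.length_append, List.length_cons, List.length_nil, hd]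
    simp
  · -- set branch: the head digit witnesses any>4 on the current tail
    have hd : (x.drop i).any (fun a => decide (4 < a)) = true := by
      have hm : x.getD i 0 ∈ x.drop i := by
        rw [List.drop_eq_getElem_cons h, List.getD_eq_getElem x 0 h]
        exact List.mem_cons_self
      exact List.any_eq_true.mpr ⟨_, hm, by simpa using ‹4 < x.getD i 0›⟩
    simp only [List.length_set, hd, if_true]
    split <;> omega
  · -- plain branch: any>4 on the shorter tail implies it on the longer
    have hmono : (x.drop (i + 1)).any (fun a => decide (4 < a)) = true →
        (x.drop i).any (fun a => decide (4 < a)) = true := by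
      intro hall
      obtain ⟨a, ha, hgt⟩ := List.any_eq_true.mp hall
      refine List.any_eq_true.mpr ⟨a, ?_, hgt⟩
      rw [List.drop_eq_getElem_cons h]
      exact List.mem_cons_of_mem _ ha
    by_cases hb : (x.drop (i + 1)).any (fun a => decide (4 < a)) = true
    · rw [hb, hmono hb]; simp; omega
    · rw [Bool.not_eq_true] at hb
      simp only [hb, Bool.false_eq_true, if_false]
      split <;> omega

def to_nine_sym (num : Int) : String :=
  let x := to_nine_inv num
  String.join ((symLoop x [] 0).reverse)

-- ===== PORT B =====
def altLoop (x : Int) (digits : List String) : List String :=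
  if h : 0 < x then
    let r := PySem.Int.mod x 9
    let x1 := PySem.Int.floordiv x 9
    let p := if 4 < r then (r - 9, x1 + 1) else (r, x1)
    altLoop p.2 (digits ++ [if p.1 < 0 then "{^" ++ PySem.Int.toStr (-p.1) ++ "}" else PySem.Int.toStr p.1])
  else digits
termination_by x.toNat
decreasing_by
  have h9 : PySem.Int.floordiv x 9 = x / 9 := PySem.Int.floordiv_eq_ediv_of_pos (by omega)
  have hm : PySem.Int.mod x 9 = x % 9 := PySem.Int.mod_eq_emod_of_pos (by omega)
  simp only [h9, hm]
  split <;> omega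

def to_nine_sym_alt (num : Int) : String :=
  let x := num
  if x = 0 then "0"
  else if x < 0 then ""
  else String.join ((altLoop x []).reverse)

-- ===== PRECONDITION & SPEC =====
def Spec_to_nine_sym (num : Int) (out : String) : Prop := out = to_nine_sym_alt num
instance (num : Int) (out : String) : Decidable (Spec_to_nine_sym num out) := by unfold Spec_to_nine_sym; infer_instance

-- ===== CLAIM (what is proved, stated in full; the proofs are below) =====
def Claim_equal_to_nine_sym : Prop := ∀ (num : Int), Dom_to_nine_sym num → Spec_to_nine_sym num (to_nine_sym num)

-- ===== LEMMAS AND PROOFS =====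

-- value of a least-significant-first base-9 digit list
def pvVal (l : List Int) : Int := l.foldr (fun d acc => d + 9 * acc) 0

-- invariant of the tail x.drop i during A's rewrite pass: every digit is 0..9, every digit
-- after the head is 0..8, and the most significant digit is ≥ 1
def pvInv (l : List Int) : Prop :=
  (∀ a ∈ l, 0 ≤ a ∧ a ≤ 9) ∧ (∀ a ∈ l.tail, a ≤ 8) ∧ 1 ≤ l.getLastD 1

theorem pvGetLastD_indep (l : List Int) (a b : Int) (h : l ≠ []) : l.getLastD a = l.getLastD b := by
  rw [List.getLastD_eq_getLast?, List.getLastD_eq_getLast?, List.getLast?_eq_some_getLast h]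
  simp

theorem pvVal_nonneg : ∀ (l : List Int), (∀ a ∈ l, 0 ≤ a) → 0 ≤ pvVal l := by
  intro l
  induction l with
  | nil => intro _; simp [pvVal]
  | cons d rest ih =>
    intro hb
    have h1 : 0 ≤ pvVal rest := ih fun a ha => hb a (List.mem_cons_of_mem _ ha)
    have h2 : 0 ≤ d := hb d List.mem_cons_self
    simp only [pvVal, List.foldr_cons] at *
    omega

theorem pvVal_pos : ∀ (l : List Int), l ≠ [] → pvInv l → 1 ≤ pvVal l := by
  intro l
  induction l with
  | nil => intro h; exact absurd rfl h
  | cons d rest ih =>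
    intro _ hInv
    obtain ⟨hb, ht, hl⟩ := hInv
    match rest with
    | [] =>
      simp only [List.getLastD_cons, List.getLastD_nil] at hl
      simp only [pvVal, List.foldr_cons, List.foldr_nil]
      omega
    | e :: rs =>
      have hr : 1 ≤ pvVal (e :: rs) := by
        refine ih (by simp) ⟨?_, ?_, ?_⟩
        · exact fun a ha => hb a (List.mem_cons_of_mem _ ha)
        · exact fun a ha => ht a (List.mem_of_mem_tail ha)
        · rw [pvGetLastD_indep _ 1 d (by simp)]
          rwa [List.getLastD_cons] at hl
      have hd : 0 ≤ d := (hb d List.mem_cons_self).1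
      simp only [pvVal, List.foldr_cons] at *
      omega

-- digits produced by nineLoop
def pvDigits (x : Int) : List Int :=
  if 0 < x then (PySem.Int.mod x 9) :: pvDigits (PySem.Int.floordiv x 9) else []
termination_by x.toNat
decreasing_by
  rw [PySem.Int.floordiv_eq_ediv_of_pos (by omega)]
  omega

theorem nineLoop_eq : ∀ (x : Int) (res : List Int), nineLoop x res = res ++ pvDigits x := by
  intro x res
  fun_induction nineLoop x res with
  | case1 x res h ih =>
    rw [ih]
    conv_rhs => rw [pvDigits, if_pos h]
    simp
  | case2 x res h =>
    rw [pvDigits, if_neg h]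
    simp

theorem pvDigits_eq_nil (x : Int) : pvDigits x = [] ↔ ¬ 0 < x := by
  rw [pvDigits]; split <;> simp_all

theorem pvDigits_bounds : ∀ (x : Int),
    (∀ a ∈ pvDigits x, 0 ≤ a ∧ a ≤ 8) ∧ 1 ≤ (pvDigits x).getLastD 1 := by
  intro x
  fun_induction pvDigits x with
  | case1 x h ih =>
    have hm0 : 0 ≤ PySem.Int.mod x 9 := PySem.Int.mod_nonneg x (by omega)
    have hm8 : PySem.Int.mod x 9 < 9 := PySem.Int.mod_lt x (by omega)
    refine ⟨?_, ?_⟩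
    · intro a ha
      rcases List.mem_cons.mp ha with h1 | h2
      · omega
      · exact ih.1 a h2
    · by_cases hnil : pvDigits (PySem.Int.floordiv x 9) = []
      · have hfd : ¬ 0 < PySem.Int.floordiv x 9 := (pvDigits_eq_nil _).mp hnil
        rw [PySem.Int.floordiv_eq_ediv_of_pos (by omega)] at hfd
        have hmv : PySem.Int.mod x 9 = x % 9 := PySem.Int.mod_eq_emod_of_pos (by omega)
        rw [hnil, List.getLastD_cons, List.getLastD_nil, hmv]
        omega
      · rw [List.getLastD_cons, pvGetLastD_indep _ _ 1 hnil]
        exact ih.2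
  | case2 x h => simp

theorem pvInv_digits (x : Int) : pvInv (pvDigits x) := by
  obtain ⟨hb, hl⟩ := pvDigits_bounds x
  exact ⟨fun a ha => by have := hb a ha; omega,
         fun a ha => (hb a (List.mem_of_mem_tail ha)).2, hl⟩

theorem pvVal_digits : ∀ (x : Int), 0 ≤ x → pvVal (pvDigits x) = x := by
  intro x
  fun_induction pvDigits x with
  | case1 x h ih =>
    have hfd : PySem.Int.floordiv x 9 = x / 9 := PySem.Int.floordiv_eq_ediv_of_pos (by omega)
    have hmv : PySem.Int.mod x 9 = x % 9 := PySem.Int.mod_eq_emod_of_pos (by omega)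
    have h2 : pvVal (pvDigits (PySem.Int.floordiv x 9)) = PySem.Int.floordiv x 9 :=
      ih (by rw [hfd]; omega)
    simp only [pvVal, List.foldr_cons] at *
    rw [h2, hfd, hmv]
    omega
  | case2 x h =>
    intro h0
    have hx0 : x = 0 := by omega
    simp [hx0, pvVal, pvDigits]

-- one unfolding of B's loop for v ≥ 1 written as v = d + 9 * w with 0 ≤ d ≤ 9
theorem altLoop_step (d w : Int) (digits : List String) (hd0 : 0 ≤ d) (hd9 : d ≤ 9)
    (hw : 0 ≤ w) (hpos : 1 ≤ d + 9 * w) :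
    altLoop (d + 9 * w) digits =
      if 4 < d then
        if d = 9 then altLoop (w + 1) (digits ++ ["0"])
        else altLoop (w + 1) (digits ++ ["{^" ++ PySem.Int.toStr (9 - d) ++ "}"])
      else altLoop w (digits ++ [PySem.Int.toStr d]) := by
  have hv : 0 < d + 9 * w := by omega
  have hmv : PySem.Int.mod (d + 9 * w) 9 = (d + 9 * w) % 9 := PySem.Int.mod_eq_emod_of_pos (by omega)
  have hfv : PySem.Int.floordiv (d + 9 * w) 9 = (d + 9 * w) / 9 := PySem.Int.floordiv_eq_ediv_of_pos (by omega)
  rw [altLoop, dif_pos hv]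
  by_cases h9 : d = 9
  · subst h9
    have hr : (9 + 9 * w) % 9 = 0 := by omega
    have hq : (9 + 9 * w) / 9 = w + 1 := by omega
    have ht0 : PySem.Int.toStr (0 : Int) = "0" := by decide
    simp only [hmv, hfv, hr, hq]
    norm_num [ht0]
  · have hr : (d + 9 * w) % 9 = d := by omega
    have hq : (d + 9 * w) / 9 = w := by omega
    simp only [hmv, hfv, hr, hq]
    by_cases h4 : 4 < d
    · rw [if_pos h4, if_pos h4, if_neg h9]
      have hneg : d - 9 < 0 := by omega
      simp [hneg]
    · rw [if_neg h4, if_neg h4]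
      have hnn : ¬ d < 0 := by omega
      simp [hnn]

theorem pvVal_cons (a : Int) (l : List Int) : pvVal (a :: l) = a + 9 * pvVal l := rfl

theorem pvInv_tail (d : Int) (rest : List Int) (h : pvInv (d :: rest)) : pvInv rest := by
  obtain ⟨hb, ht, hl⟩ := h
  refine ⟨?_, ?_, ?_⟩
  · exact fun a ha => ⟨(hb a (List.mem_cons_of_mem _ ha)).1, by
      have := ht a ha; omega⟩
  · exact fun a ha => ht a (List.mem_of_mem_tail ha)
  · by_cases hnil : rest = []
    · simp [hnil]
    · rw [pvGetLastD_indep rest 1 d hnil]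
      rwa [List.getLastD_cons] at hl

theorem pvInv_carry (d e : Int) (rs : List Int) (h : pvInv (d :: e :: rs)) : pvInv ((e + 1) :: rs) := by
  obtain ⟨hb, ht, hl⟩ := h
  have he0 : 0 ≤ e := (hb e (by simp)).1
  have he8 : e ≤ 8 := ht e (by simp)
  refine ⟨?_, ?_, ?_⟩
  · intro a ha
    rcases List.mem_cons.mp ha with h1 | h2
    · omega
    · exact ⟨(hb a (by simp [h2])).1, by have := ht a (by simp [h2]); omega⟩
  · exact fun a ha => ht a (List.mem_cons_of_mem _ ha)
  · by_cases hnil : rs = []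
    · simp [hnil]
      omega
    · rw [List.getLastD_cons, pvGetLastD_indep rs (e + 1) e hnil]
      rwa [List.getLastD_cons, List.getLastD_cons] at hl

theorem pvBrace (s : String) : "{" ++ ("^" ++ s) = "{^" ++ s := by
  rw [← String.append_assoc]; rfl

theorem symLoop_eq_altLoop : ∀ (x : List Int) (res : List String) (i : Nat),
    pvInv (x.drop i) → symLoop x res i = altLoop (pvVal (x.drop i)) res := by
  intro x res i
  fun_induction symLoop x res i with
  | case1 x res i h d hd4 res' heq ih =>
    intro hInv
    have hdrop : x.drop i = [x.getD i 0] := by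
      rw [List.drop_eq_getElem_cons h, List.drop_of_length_le (by omega), List.getD_eq_getElem x 0 h]
    rw [hdrop] at hInv
    have hd0 : 0 ≤ x.getD i 0 := (hInv.1 _ (by simp)).1
    have hd9 : x.getD i 0 ≤ 9 := (hInv.1 _ (by simp)).2
    have hstep := altLoop_step (x.getD i 0) 0 res hd0 hd9 (le_refl 0) (by omega)
    simp only [mul_zero, add_zero, zero_add] at hstep
    rw [hdrop, pvVal_cons, show pvVal ([] : List Int) = 0 from rfl, mul_zero, add_zero,
      hstep, if_pos hd4]
    have hx1 : (x ++ [1]).drop (i + 1) = [1] := by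
      rw [List.drop_append_of_le_length (by omega)]
      simp [List.drop_of_length_le (by omega : x.length ≤ i + 1)]
    have hIH := ih (by rw [hx1]; exact ⟨by norm_num, by norm_num, by norm_num⟩)
    rw [hx1] at hIH
    have hv1 : pvVal [1] = 1 := by norm_num [pvVal]
    rw [hIH, hv1]
    by_cases h9 : x.getD i 0 = 9
    · rw [if_pos h9]
      congr 1
      show res ++ [if x.getD i 0 = 9 then "0" else "{" ++ ("^" ++ PySem.Int.toStr (9 - x.getD i 0)) ++ "}"] = res ++ ["0"]
      rw [if_pos h9]
    · rw [if_neg h9]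
      congr 1
      show res ++ [if x.getD i 0 = 9 then "0" else "{" ++ ("^" ++ PySem.Int.toStr (9 - x.getD i 0)) ++ "}"] = res ++ ["{^" ++ PySem.Int.toStr (9 - x.getD i 0) ++ "}"]
      rw [if_neg h9, pvBrace]
  | case2 x res i h d hd4 res' hne ih =>
    intro hInv
    have hlt : i + 1 < x.length := by omega
    have hdrop : x.drop i = x.getD i 0 :: x.drop (i + 1) := by
      rw [List.drop_eq_getElem_cons h, List.getD_eq_getElem x 0 h]
    have hdrop2 : x.drop (i + 1) = x.getD (i + 1) 0 :: x.drop (i + 2) := by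
      rw [List.drop_eq_getElem_cons hlt, List.getD_eq_getElem x 0 hlt]
    rw [hdrop, hdrop2] at hInv
    have hd0 : 0 ≤ x.getD i 0 := (hInv.1 _ (by simp)).1
    have hd9 : x.getD i 0 ≤ 9 := (hInv.1 _ (by simp)).2
    have hInvTail : pvInv (x.getD (i + 1) 0 :: x.drop (i + 2)) := pvInv_tail _ _ hInv
    have hw : 0 ≤ pvVal (x.drop (i + 1)) := by
      rw [hdrop2]
      exact pvVal_nonneg _ fun a ha => (hInvTail.1 a ha).1
    have hstep := altLoop_step (x.getD i 0) (pvVal (x.drop (i + 1))) res hd0 hd9 hw (by omega)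
    rw [hdrop, pvVal_cons, hstep, if_pos hd4]
    have hset : (x.set (i + 1) (x.getD (i + 1) 0 + 1)).drop (i + 1)
        = (x.getD (i + 1) 0 + 1) :: x.drop (i + 2) := by
      have h1 : i + 1 < (x.set (i + 1) (x.getD (i + 1) 0 + 1)).length := by simpa using hlt
      rw [List.drop_eq_getElem_cons h1]
      congr 1
      · simp
      · rw [List.drop_set]
        simp
    have hIH := ih (by rw [hset]; exact pvInv_carry _ _ _ hInv)
    rw [hset] at hIH
    have hval : pvVal ((x.getD (i + 1) 0 + 1) :: x.drop (i + 2)) = pvVal (x.drop (i + 1)) + 1 := by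
      rw [hdrop2, pvVal_cons, pvVal_cons]
      ring
    rw [hIH, hval]
    by_cases h9 : x.getD i 0 = 9
    · rw [if_pos h9]
      congr 1
      show res ++ [if x.getD i 0 = 9 then "0" else "{" ++ ("^" ++ PySem.Int.toStr (9 - x.getD i 0)) ++ "}"] = res ++ ["0"]
      rw [if_pos h9]
    · rw [if_neg h9]
      congr 1
      show res ++ [if x.getD i 0 = 9 then "0" else "{" ++ ("^" ++ PySem.Int.toStr (9 - x.getD i 0)) ++ "}"] = res ++ ["{^" ++ PySem.Int.toStr (9 - x.getD i 0) ++ "}"]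
      rw [if_neg h9, pvBrace]
  | case3 x res i h d hd4 ih =>
    intro hInv
    have hdrop : x.drop i = x.getD i 0 :: x.drop (i + 1) := by
      rw [List.drop_eq_getElem_cons h, List.getD_eq_getElem x 0 h]
    rw [hdrop] at hInv
    have hd0 : 0 ≤ x.getD i 0 := (hInv.1 _ (by simp)).1
    have hd9 : x.getD i 0 ≤ 9 := (hInv.1 _ (by simp)).2
    have hInvTail : pvInv (x.drop (i + 1)) := pvInv_tail _ _ hInv
    have hw : 0 ≤ pvVal (x.drop (i + 1)) :=
      pvVal_nonneg _ fun a ha => (hInvTail.1 a ha).1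
    have hpos : 1 ≤ x.getD i 0 + 9 * pvVal (x.drop (i + 1)) := by
      have := pvVal_pos (x.drop i) (by rw [hdrop]; simp) (by rw [hdrop]; exact hInv)
      rw [hdrop, pvVal_cons] at this
      exact this
    have hstep := altLoop_step (x.getD i 0) (pvVal (x.drop (i + 1))) res hd0 hd9 hw hpos
    rw [hdrop, pvVal_cons, hstep, if_neg hd4]
    exact ih hInvTail
  | case4 x res i h =>
    intro _
    have hnil : x.drop i = [] := List.drop_of_length_le (by omega)
    rw [hnil]
    simp [pvVal, altLoop]


-- ===== VERDICT (by name: the statement is the Claim_ definition above) =====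
theorem to_nine_sym_spec : Claim_equal_to_nine_sym := by
  unfold Claim_equal_to_nine_sym Spec_to_nine_sym
  intro num _
  have haltE : ¬ num = 0 → ¬ num < 0 →
      to_nine_sym_alt num = String.join ((altLoop num []).reverse) := by
    intro h0 hneg
    show (if num = 0 then "0" else if num < 0 then "" else
      String.join ((altLoop num []).reverse)) = _
    rw [if_neg h0, if_neg hneg]
  by_cases h0 : num = 0
  · subst h0
    have ht0 : PySem.Int.toStr (0 : Int) = "0" := by decide
    have h2 : symLoop [0] [] 0 = ["0"] := by
      rw [symLoop.eq_def]
      simp [ht0]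
      rw [symLoop.eq_def]
      simp
    show String.join ((symLoop (to_nine_inv 0) [] 0).reverse) = to_nine_sym_alt 0
    rw [to_nine_inv, if_pos rfl, h2]
    decide
  · by_cases hneg : num < 0
    · have hdig : pvDigits num = [] := (pvDigits_eq_nil num).mpr (by omega)
      show String.join ((symLoop (to_nine_inv num) [] 0).reverse) = to_nine_sym_alt num
      rw [to_nine_inv, if_neg h0, nineLoop_eq, List.nil_append, hdig]
      rw [symLoop.eq_def]
      show String.join (([] : List String).reverse) =
        (if num = 0 then "0" else if num < 0 then "" else
          String.join ((altLoop num []).reverse))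
      rw [if_neg h0, if_pos hneg]
      decide
    · have hpos : 0 < num := by omega
      show String.join ((symLoop (to_nine_inv num) [] 0).reverse) = to_nine_sym_alt num
      rw [to_nine_inv, if_neg h0, nineLoop_eq, List.nil_append]
      have hmain := symLoop_eq_altLoop (pvDigits num) [] 0
        (by rw [List.drop_zero]; exact pvInv_digits num)
      rw [List.drop_zero] at hmain
      rw [hmain, pvVal_digits num (le_of_lt hpos), haltE h0 hneg]
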